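-- pv_equiv track=rewrite | github.com/Hukuta/caesar | caesar.py | symbol_statistics
-- ===== SOURCE A (Python) =====
-- def symbol_statistics(book, symbols_lower):
--     stat = dict()
--     for symbol_lower in symbols_lower:
--         stat[symbol_lower] = 0
--
--     for symbol in book:
--         symbol = symbol.lower()
--
--         if symbol in symbols_lower:
--             stat[symbol] += 1
--
--     return sorted(stat.items(), key=lambda x: x[1], reverse=True)
-- ===== SOURCE B (Python) =====
-- def symbol_statistics(book, symbols_lower):
--     # Count every (lowercased) character of the book once, then look up the
--     # requested symbols: no membership test inside the counting loop.
--     counts = {}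
--     for ch in book:
--         ch = ch.lower()
--         counts[ch] = counts.get(ch, 0) + 1
--     stat = {sym: counts.get(sym, 0) for sym in symbols_lower}
--     return sorted(stat.items(), key=lambda x: x[1], reverse=True)
-- ===== Notes on version B (the rewrite author's own statement) =====
-- stated objective: faster
-- what changed: B counts every lowercased character of the book unconditionally into one frequency table and then looks the requested symbols up in a separate pass, instead of A's membership-filtered counting pass over a pre-zeroed dict.
import Mathlib
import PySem

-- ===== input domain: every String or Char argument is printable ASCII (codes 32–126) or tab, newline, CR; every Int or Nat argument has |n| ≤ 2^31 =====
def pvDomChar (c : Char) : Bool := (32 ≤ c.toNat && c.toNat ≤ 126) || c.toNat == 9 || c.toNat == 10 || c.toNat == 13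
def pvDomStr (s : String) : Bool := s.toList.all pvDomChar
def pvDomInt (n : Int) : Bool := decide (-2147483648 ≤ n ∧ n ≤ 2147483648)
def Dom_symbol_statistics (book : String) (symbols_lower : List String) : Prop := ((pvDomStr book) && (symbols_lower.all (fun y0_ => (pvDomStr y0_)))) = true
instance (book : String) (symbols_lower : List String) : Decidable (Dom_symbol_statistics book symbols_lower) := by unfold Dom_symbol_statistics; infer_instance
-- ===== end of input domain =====

-- B builds a full frequency table of the (lowercased) book in one unconditional pass and then
-- looks the requested symbols up, instead of A's per-character list-membership counting pass; objective: faster.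


-- ===== PORT A =====
-- stat[symbol] += 1 is ported as Dict.modify; it is exact here because the guarded key is
-- always present (it was inserted by the initialisation loop), so Python never raises.
def symbol_statistics (book : String) (symbols_lower : List String) : List (String × Int) :=
  let stat0 : PySem.Dict String Int :=
    symbols_lower.foldl (fun d s => d.insert s 0) PySem.Dict.empty
  let stat : PySem.Dict String Int :=
    book.toList.foldl (fun d c =>
      let symbol := PySem.Str.lower (String.mk [c])
      if symbols_lower.contains symbol then d.modify symbol 0 (· + 1) else d) stat0
  PySem.List.sorted stat.items (fun x => x.2) true

-- ===== PORT B =====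
def symbol_statistics_alt (book : String) (symbols_lower : List String) : List (String × Int) :=
  let counts : PySem.Dict String Int :=
    book.toList.foldl (fun d c =>
      let ch := PySem.Str.lower (String.mk [c])
      d.insert ch (d.getD ch 0 + 1)) PySem.Dict.empty
  let stat : PySem.Dict String Int :=
    symbols_lower.foldl (fun d s => d.insert s (counts.getD s 0)) PySem.Dict.empty
  PySem.List.sorted stat.items (fun x => x.2) true

-- ===== PRECONDITION & SPEC =====
def Spec_symbol_statistics (book : String) (symbols_lower : List String) (out : List (String × Int)) : Prop := out = symbol_statistics_alt book symbols_lower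
instance (book : String) (symbols_lower : List String) (out : List (String × Int)) : Decidable (Spec_symbol_statistics book symbols_lower out) := by unfold Spec_symbol_statistics; infer_instance

-- ===== CLAIM (what is proved, stated in full; the proofs are below) =====
def Claim_equal_symbol_statistics : Prop := ∀ (book : String) (symbols_lower : List String), Dom_symbol_statistics book symbols_lower → Spec_symbol_statistics book symbols_lower (symbol_statistics book symbols_lower)



-- ===== LEMMAS AND PROOFS =====

-- the lowercased one-character string both loops compute from a book character
def pvKey (c : Char) : String := PySem.Str.lower (String.mk [c])

-- A conditional fold is a fold over the filtered list.
theorem pv_foldl_if_filter {α β : Type} (p : α → Bool) (g : β → α → β) :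
    ∀ (l : List α) (d : β),
      l.foldl (fun d x => if p x then g d x else d) d = (l.filter p).foldl g d := by
  intro l
  induction l with
  | nil => intro d; rfl
  | cons x t ih =>
    intro d
    by_cases h : p x = true
    · simp [List.filter, h, ih]
    · simp at h
      simp [List.filter, h, ih]

-- After initialising every key to 0, every getD-with-default-0 is 0.
theorem pv_getD_init_zero :
    ∀ (l : List String) (d : PySem.Dict String Int) (k : String), d.getD k 0 = 0 →
      (l.foldl (fun d s => d.insert s 0) d).getD k 0 = 0 := by
  intro l
  induction l with
  | nil => intro d k h; exact h
  | cons s t ih =>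
    intro d k h
    refine ih _ _ ?_
    rw [PySem.Dict.getD_insert]
    split <;> simp [h]

-- Inserting values that depend only on the key: the last write wins and equals f k.
theorem pv_getD_insert_fn (f : String → Int) :
    ∀ (l : List String) (d : PySem.Dict String Int) (k : String),
      (l.foldl (fun d s => d.insert s (f s)) d).getD k 0 =
        if k ∈ l then f k else d.getD k 0 := by
  intro l
  induction l with
  | nil => intro d k; simp
  | cons s t ih =>
    intro d k
    rw [List.foldl_cons, ih, PySem.Dict.getD_insert]
    by_cases hm : k ∈ t
    · simp [hm]
    · by_cases hk : k = s <;> simp [hm, hk]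

-- Set.update with elements already present changes nothing.
theorem pv_update_subset :
    ∀ (l : List String) (s : PySem.Set String), (∀ x ∈ l, x ∈ s) → PySem.Set.update s l = s := by
  intro l
  induction l with
  | nil => intro s _; rfl
  | cons x t ih =>
    intro s h
    have hx : x ∈ s := h x (List.mem_cons_self ..)
    have hadd : PySem.Set.add s x = s := by
      simp [PySem.Set.add, PySem.Set.contains]
      exact hx
    calc PySem.Set.update s (x :: t)
        = PySem.Set.update (PySem.Set.add s x) t := rfl
      _ = PySem.Set.update s t := by rw [hadd]
      _ = s := ih s (fun y hy => h y (List.mem_cons_of_mem _ hy))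

-- Association lists with equal nodup key sequences and equal first-match values are equal.
theorem pv_assoc_ext :
    ∀ (ld le : List (String × Int)),
      ld.map Prod.fst = le.map Prod.fst → (ld.map Prod.fst).Nodup →
      (∀ k ∈ ld.map Prod.fst,
        (PySem.Dict.mk ld).getD k 0 = (PySem.Dict.mk le).getD k 0) → ld = le := by
  intro ld
  induction ld with
  | nil =>
    intro le hk _ _
    have := hk.symm
    simp at this
    simp [this]
  | cons p t ih =>
    intro le hk hn hv
    cases le with
    | nil => simp at hk
    | cons q u =>
      obtain ⟨k1, v1⟩ := p
      obtain ⟨k2, v2⟩ := q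
      simp at hk
      obtain ⟨hk12, hkt⟩ := hk
      subst hk12
      have hv1 : v1 = v2 := by
        have := hv k1 (by simp)
        simpa [PySem.Dict.getD, PySem.Dict.get?, List.find?] using this
      subst hv1
      simp at hn
      refine congrArg (List.cons (k1, v1)) (ih u hkt hn.2 ?_)
      intro k hkmem
      have hne : k1 ≠ k := by
        rintro rfl
        obtain ⟨⟨k', v⟩, hp, rfl⟩ := List.mem_map.mp hkmem
        exact hn.1 v hp
      have hbe : (k1 == k) = false := beq_eq_false_iff_ne.mpr hne
      have := hv k (by simp [hkmem])
      simpa [PySem.Dict.getD, PySem.Dict.get?, List.find?, hbe] using this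

theorem pv_dict_ext (d e : PySem.Dict String Int)
    (hk : d.keys = e.keys) (hn : d.keys.Nodup)
    (hv : ∀ k ∈ d.keys, d.getD k 0 = e.getD k 0) : d = e := by
  obtain ⟨ld⟩ := d
  obtain ⟨le⟩ := e
  exact congrArg PySem.Dict.mk (pv_assoc_ext ld le hk hn hv)

-- The two dictionaries the ports sort are equal.
theorem pv_dicts_eq (book : String) (symbols_lower : List String) :
    book.toList.foldl (fun d c =>
        if symbols_lower.contains (pvKey c) then d.modify (pvKey c) 0 (· + 1) else d)
      (symbols_lower.foldl (fun d s => d.insert s 0)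
        (PySem.Dict.empty : PySem.Dict String Int))
    = symbols_lower.foldl (fun d s =>
        d.insert s ((book.toList.foldl (fun d c => d.insert (pvKey c) (d.getD (pvKey c) 0 + 1))
          (PySem.Dict.empty : PySem.Dict String Int)).getD s 0)) (PySem.Dict.empty : PySem.Dict String Int) := by
  have hAfold :
      book.toList.foldl (fun d c =>
          if symbols_lower.contains (pvKey c) then d.modify (pvKey c) 0 (· + 1) else d)
        (symbols_lower.foldl (fun d s => d.insert s 0) (PySem.Dict.empty : PySem.Dict String Int))
      = ((book.toList.map pvKey).filter (fun x => symbols_lower.contains x)).foldl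
          (fun d x => d.modify x 0 (· + 1))
          (symbols_lower.foldl (fun d s => d.insert s 0) (PySem.Dict.empty : PySem.Dict String Int)) := by
    rw [← pv_foldl_if_filter (fun x => symbols_lower.contains x)
        (fun d x => PySem.Dict.modify d x 0 (· + 1)), List.foldl_map]
  have hcounter :
      book.toList.foldl (fun d c => d.insert (pvKey c) (d.getD (pvKey c) 0 + 1)) (PySem.Dict.empty : PySem.Dict String Int)
        = PySem.Dict.counter (book.toList.map pvKey) := by
    rw [← PySem.Dict.foldl_insert_getD_add_one_eq_counter, List.foldl_map]
  rw [hAfold]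
  have hkeys0 :
      (symbols_lower.foldl (fun d s => d.insert s 0) (PySem.Dict.empty : PySem.Dict String Int)).keys
        = PySem.Set.ofList symbols_lower := by
    rw [PySem.Dict.keys_foldl_insert]; rfl
  have hkeysA :
      (((book.toList.map pvKey).filter (fun x => symbols_lower.contains x)).foldl
          (fun d x => d.modify x 0 (· + 1))
          (symbols_lower.foldl (fun d s => d.insert s 0) (PySem.Dict.empty : PySem.Dict String Int))).keys
        = PySem.Set.ofList symbols_lower := by
    rw [PySem.Dict.keys_foldl_modify (f := fun _ _ => (· + 1)), hkeys0]
    refine pv_update_subset _ _ ?_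
    intro x hx
    have := List.of_mem_filter hx
    rw [PySem.Set.mem_ofList]
    simpa using this
  have hkeysB :
      (symbols_lower.foldl (fun d s =>
          d.insert s ((book.toList.foldl (fun d c => d.insert (pvKey c) (d.getD (pvKey c) 0 + 1))
            (PySem.Dict.empty : PySem.Dict String Int)).getD s 0)) (PySem.Dict.empty : PySem.Dict String Int)).keys
        = PySem.Set.ofList symbols_lower := by
    rw [PySem.Dict.keys_foldl_insert]; rfl
  refine pv_dict_ext _ _ ?_ ?_ ?_
  · rw [hkeysA, hkeysB]
  · rw [hkeysA]; exact PySem.Set.nodup_ofList symbols_lower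
  · intro k hk
    rw [hkeysA, PySem.Set.mem_ofList] at hk
    have hA :
        (((book.toList.map pvKey).filter (fun x => symbols_lower.contains x)).foldl
            (fun d x => d.modify x 0 (· + 1))
            (symbols_lower.foldl (fun d s => d.insert s 0) (PySem.Dict.empty : PySem.Dict String Int))).getD k 0
          = (((book.toList.map pvKey).filter (fun x => symbols_lower.contains x)).count k : Int) := by
      rw [PySem.Dict.getD_foldl_modify_add_one,
        pv_getD_init_zero symbols_lower (PySem.Dict.empty : PySem.Dict String Int) k (by rfl), zero_add]
    have hB :
        (symbols_lower.foldl (fun d s =>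
            d.insert s ((book.toList.foldl (fun d c => d.insert (pvKey c) (d.getD (pvKey c) 0 + 1))
              (PySem.Dict.empty : PySem.Dict String Int)).getD s 0)) (PySem.Dict.empty : PySem.Dict String Int)).getD k 0
          = ((book.toList.map pvKey).count k : Int) := by
      rw [pv_getD_insert_fn, if_pos hk, hcounter, PySem.Dict.getD_counter]
    rw [hA, hB]
    congr 1
    exact List.count_filter (by simpa using hk)

theorem symbol_statistics_main : ∀ (book : String) (symbols_lower : List String),
    symbol_statistics book symbols_lower = symbol_statistics_alt book symbols_lower := by
  intro book symbols_lower
  exact congrArg (fun d : PySem.Dict String Int => PySem.List.sorted d.items (fun x => x.2) true)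
    (pv_dicts_eq book symbols_lower)

-- ===== VERDICT (by name: the statement is the Claim_ definition above) =====
theorem symbol_statistics_spec : Claim_equal_symbol_statistics := by
  intro book symbols_lower _
  exact symbol_statistics_main book symbols_lower
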